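-- pv_equiv track=rewrite | github.com/MrBrantCode/unitest_baseline | mut_generate/mist_train_cf/cf_4259/solution.py | sum_even_recursive
-- ===== SOURCE A (Python) =====
-- def sum_even_recursive(arr, n):
--     if n == 0:
--         return 0
--     else:
--         if arr[n-1] % 2 == 0:
--             return arr[n-1] + sum_even_recursive(arr, n-1)
--         else:
--             return sum_even_recursive(arr, n-1)
-- ===== SOURCE B (Python) =====
-- def sum_even_recursive(arr, n):
--     total = 0
--     for i in range(n):
--         if arr[i] % 2 == 0:
--             total += arr[i]
--     return total
-- ===== Notes on version B (the rewrite author's own statement) =====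
-- stated objective: simpler
-- what changed: Replaces the index-driven recursion with a single forward iterative index loop over range(n) accumulating the even elements.
import Mathlib
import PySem

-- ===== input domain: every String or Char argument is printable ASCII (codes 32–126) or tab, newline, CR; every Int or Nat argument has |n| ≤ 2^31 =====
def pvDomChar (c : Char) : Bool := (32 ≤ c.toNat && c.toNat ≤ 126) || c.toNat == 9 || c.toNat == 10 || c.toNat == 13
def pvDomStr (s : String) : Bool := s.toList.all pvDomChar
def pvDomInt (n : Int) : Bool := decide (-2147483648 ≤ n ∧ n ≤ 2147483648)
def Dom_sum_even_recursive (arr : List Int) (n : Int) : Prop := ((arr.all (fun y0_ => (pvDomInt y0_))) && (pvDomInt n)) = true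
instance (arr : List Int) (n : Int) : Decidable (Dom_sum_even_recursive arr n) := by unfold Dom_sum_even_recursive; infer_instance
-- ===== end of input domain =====

-- B replaces A's backward recursion with a single forward iterative index loop accumulating the even elements; objective: simpler.


-- ===== PORT A =====
-- A recurses on n; under Pre_ (0 ≤ n) the recursion depth is n.toNat, used here as the
-- structural measure. pyGetD's default 0 is unreachable under Pre_ (index n-1 is in range).
def pvSumEvenRecA (arr : List Int) : Nat → Int
  | 0 => 0
  | Nat.succ k =>
    let v := PySem.List.pyGetD arr (k : Int) 0
    if PySem.Int.mod v 2 == 0 then v + pvSumEvenRecA arr k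
    else pvSumEvenRecA arr k

def sum_even_recursive (arr : List Int) (n : Int) : Int :=
  pvSumEvenRecA arr n.toNat

-- ===== PORT B =====
-- pyGetD's default 0 is unreachable under Pre_ (every i in range(n) is a valid index).
def sum_even_recursive_alt (arr : List Int) (n : Int) : Int :=
  (PySem.List.pyRange 0 n 1).foldl
    (fun total i =>
      if PySem.Int.mod (PySem.List.pyGetD arr i 0) 2 == 0 then
        total + PySem.List.pyGetD arr i 0
      else total) 0

-- ===== PRECONDITION & SPEC =====
-- Pre_ excludes n > len(arr), where A raises IndexError, and n < 0, where A's recursion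
-- never reaches 0 (RecursionError).
def Pre_sum_even_recursive (arr : List Int) (n : Int) : Prop :=
  0 ≤ n ∧ n ≤ (arr.length : Int)
instance (arr : List Int) (n : Int) : Decidable (Pre_sum_even_recursive arr n) := by
  unfold Pre_sum_even_recursive; infer_instance

def pvWitness_sum_even_recursive : List Int × Int := ([3, 4, 5, 6], 3)

def Spec_sum_even_recursive (arr : List Int) (n : Int) (out : Int) : Prop := out = sum_even_recursive_alt arr n
instance (arr : List Int) (n : Int) (out : Int) : Decidable (Spec_sum_even_recursive arr n out) := by unfold Spec_sum_even_recursive; infer_instance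

-- ===== CLAIM (what is proved, stated in full; the proofs are below) =====
def Claim_equal_sum_even_recursive : Prop := ∀ (arr : List Int) (n : Int), Dom_sum_even_recursive arr n → Pre_sum_even_recursive arr n → Spec_sum_even_recursive arr n (sum_even_recursive arr n)

-- ===== LEMMAS AND PROOFS =====
theorem pv_foldl_range (arr : List Int) (m : Nat) (acc : Int) :
    ((List.range m).map (fun k : Nat => (0 : Int) + (k : Int))).foldl
      (fun total i =>
        if PySem.Int.mod (PySem.List.pyGetD arr i 0) 2 == 0 then
          total + PySem.List.pyGetD arr i 0
        else total) acc
      = acc + pvSumEvenRecA arr m := by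
  induction m generalizing acc with
  | zero => simp [pvSumEvenRecA]
  | succ k ih =>
    rw [List.range_succ, List.map_append, List.foldl_append, ih]
    simp only [List.map_cons, List.map_nil, List.foldl_cons, List.foldl_nil,
      pvSumEvenRecA, zero_add]
    split <;> ring

-- ===== VERDICT (by name: the statement is the Claim_ definition above) =====
theorem sum_even_recursive_spec : Claim_equal_sum_even_recursive := by
  intro arr n _ hpre
  obtain ⟨h0, hlen⟩ := hpre
  unfold Spec_sum_even_recursive sum_even_recursive sum_even_recursive_alt
  have hn : n = (n.toNat : Int) := (Int.toNat_of_nonneg h0).symm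
  rw [hn, PySem.List.pyRange_one, Int.toNat_natCast]
  have : ((n.toNat : Int) - 0).toNat = n.toNat := by omega
  rw [this]
  exact ((pv_foldl_range arr n.toNat 0).trans (zero_add _)).symm
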